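-- pv_equiv track=rewrite | github.com/raghur/fuzzy-denite | scratch/pyfuzzy.py | fuzzyMatches
-- ===== SOURCE A (Python) =====
-- import functools
--
-- sep = '/\_.'
--
-- def isMatch(query, candidate, left, right):
--     matchPos = []
--     d = "r"
--     for c in query:
--         if d == "r":
--             pos =  candidate.rfind(c, left, right)
--         else:
--             pos = candidate.find(c, left, right)
--         if pos == -1:
--             return (False, matchPos)
--         else:
--             matchPos.append(pos)
--             left = pos + 1
--             if d == "r":
--                 d = "l"
--
--     return (True, matchPos)
--
-- def fuzzyMatches(query, candidates, limit):
--     """Find fuzzy matches among given candidates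
--
--     :query: TODO
--     :candidates: TODO
--     :limit: TODO
--     :returns: TODO
--
--     """
--     findFirstN = False
--     count = 0
--     for x in candidates:
--         l,r = 0, len(x)
--         didMatch = False
--         positions = []
--         while not didMatch:
--             didMatch, positions = isMatch(query, x, l, r)
--             if not positions:
--                 break
--             r = positions[0]
--         if didMatch:
--             clusterScore = 0
--             for i, p in enumerate(positions):
--                 if i > 0:
--                     clusterScore = positions[i] - positions[i-1] - 1
--             sepscore = functools.reduce(lambda x, y: x+y,
--                                         map(lambda p: 1 if x[p - 1] in sep else
--                                             0, positions))
--             count = count + 1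
--             yield (x, positions, clusterScore, len(x) - positions[0], sepscore)
--             if findFirstN and count == limit:
--                 return
-- ===== SOURCE B (Python) =====
-- # B: different strategy — the matched anchor is characterised as the MAXIMUM
-- # occurrence a of query[0] whose greedy unbounded tail match fits entirely below
-- # the next occurrence of query[0]; B scans the anchors ASCENDING once, keeping the
-- # last success, instead of A's descending retry loop with a shrinking rfind/find
-- # window. limit is unused, as in A (findFirstN is False). Generator, like A.
--
-- sep = '/\_.'
--
-- def _greedy(rest, x, left):
--     ps = []
--     for c in rest:
--         i = x.find(c, left)
--         if i < 0:
--             return None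
--         ps.append(i)
--         left = i + 1
--     return ps
--
-- def _best(query, x):
--     anchors = [i for i, c in enumerate(x) if c == query[0]]
--     best = None
--     for a, bound in zip(anchors, anchors[1:] + [len(x)]):
--         tail = _greedy(query[1:], x, a + 1)
--         if tail is not None and all(p < bound for p in tail):
--             best = [a] + tail
--     return best
--
-- def fuzzyMatches(query, candidates, limit):
--     for x in candidates:
--         positions = _best(query, x)
--         if positions is None:
--             continue
--         cluster = positions[-1] - positions[-2] - 1 if len(positions) > 1 else 0
--         sepscore = sum(1 if x[p - 1] in sep else 0 for p in positions)
--         yield (x, positions, cluster, len(x) - positions[0], sepscore)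
-- ===== Notes on version B (the rewrite author's own statement) =====
-- stated objective: alternative
-- what changed: A retries anchors top-down with a shrinking rfind/find window until the first match; B instead characterises the result as the maximum occurrence of query[0] whose unbounded greedy tail match lies entirely below the next occurrence, and finds it by one ascending scan over the occurrence list with a keep-last accumulator, with no retry loop, no direction flag and no shrinking bound.
import Mathlib
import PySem

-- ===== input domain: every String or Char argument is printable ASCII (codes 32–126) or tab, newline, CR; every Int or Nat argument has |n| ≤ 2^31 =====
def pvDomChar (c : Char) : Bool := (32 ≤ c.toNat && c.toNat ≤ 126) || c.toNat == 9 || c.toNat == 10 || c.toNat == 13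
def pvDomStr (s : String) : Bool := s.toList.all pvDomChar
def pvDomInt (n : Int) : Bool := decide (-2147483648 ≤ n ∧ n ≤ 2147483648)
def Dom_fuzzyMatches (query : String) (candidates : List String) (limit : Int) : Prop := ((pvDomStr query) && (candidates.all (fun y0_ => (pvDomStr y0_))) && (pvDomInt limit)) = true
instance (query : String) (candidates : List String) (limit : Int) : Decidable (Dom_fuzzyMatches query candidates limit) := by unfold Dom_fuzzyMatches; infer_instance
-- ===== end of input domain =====

-- B replaces A's descending retry loop (rfind anchor, bounded greedy rest, shrink the
-- window on failure) by a single ascending scan over the occurrences of query[0],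
-- keeping the last anchor whose unbounded greedy tail fits below the next occurrence.
-- Same results; alternative algorithm, not claimed faster.

-- ===== PORT A =====
def pvSep : List Char := ['/', '\\', '_', '.']

-- Hand port of Python's str.find(c, l, r) / str.rfind(c, l, r) for a ONE-CHARACTER
-- needle: scan the (index, char) pairs left-to-right (find) or right-to-left (rfind)
-- for the first hit with l ≤ i < r.  Exact for 0 ≤ l and r ≤ len(x), which covers
-- every call A makes.
def pvFindCh (x : List Char) (c : Char) (l r : Int) : Int :=
  match (PySem.List.enumerate x).find? (fun ic => ic.2 == c && decide (l ≤ ic.1) && decide (ic.1 < r)) with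
  | some ic => ic.1
  | none => -1

def pvRfindCh (x : List Char) (c : Char) (l r : Int) : Int :=
  match (PySem.List.enumerate x).reverse.find? (fun ic => ic.2 == c && decide (l ≤ ic.1) && decide (ic.1 < r)) with
  | some ic => ic.1
  | none => -1

-- the 'for c in query' loop of isMatch; d = True means direction "r"
def pvIsMatchGo (x : List Char) (r : Int) : List Char → Bool → Int → List Int → Bool × List Int
  | [], _, _, acc => (true, acc)
  | c :: cs, d, left, acc =>
    let pos := if d then pvRfindCh x c left r else pvFindCh x c left r
    if pos = -1 then (false, acc)
    else pvIsMatchGo x r cs (if d then false else d) (pos + 1) (acc ++ [pos])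

def pvIsMatch (query x : List Char) (l r : Int) : Bool × List Int :=
  pvIsMatchGo x r query true l []

-- the 'while not didMatch' loop; r strictly decreases, so len(x)+1 fuel suffices
def pvWhile (query x : List Char) : Nat → Int → Int → Bool × List Int
  | 0, _, _ => (false, [])
  | fuel+1, l, r =>
    let res := pvIsMatch query x l r
    if res.2 = [] then res
    else if res.1 then res
    else pvWhile query x fuel l (res.2.headD 0)

def pvProcessA (q : List Char) (xs : String) : List (String × List Int × Int × Int × Int) :=
  let x := xs.toList
  let res := pvWhile q x (x.length + 1) 0 (x.length : Int)
  if res.1 then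
    let positions := res.2
    let clusterScore := (PySem.List.enumerate positions).foldl
      (fun acc ip => if ip.1 > 0 then
          PySem.List.pyGetD positions ip.1 0 - PySem.List.pyGetD positions (ip.1 - 1) 0 - 1
        else acc) 0
    let ms := positions.map (fun p => if pvSep.contains (PySem.List.pyGetD x (p - 1) ' ') then (1 : Int) else 0)
    let sepscore := match ms with
      | [] => 0                      -- Python's reduce raises on []; unreachable under Pre_
      | m :: rest => rest.foldl (· + ·) m
    [(xs, positions, clusterScore, (x.length : Int) - PySem.List.pyGetD positions 0 0, sepscore)]
  else []

def fuzzyMatches (query : String) (candidates : List String) (limit : Int) : List (String × List Int × Int × Int × Int) :=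
  let findFirstN := false
  (candidates.foldl (fun st xs =>
      if st.1 then st                 -- 'return' hit earlier (never, findFirstN = False)
      else
        let out := pvProcessA query.toList xs
        if out = [] then st
        else (findFirstN && ((st.2.1 + 1) == limit), st.2.1 + 1, st.2.2 ++ out))
    ((false, 0, []) : Bool × Int × List (String × List Int × Int × Int × Int))).2.2

-- ===== PORT B =====
-- x.find(c, left) with no upper bound: first index i with left ≤ i holding c
def pvFindU (x : List Char) (c : Char) (left : Int) : Int :=
  match (PySem.List.enumerate x).find? (fun ic => ic.2 == c && decide (left ≤ ic.1)) with
  | some ic => ic.1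
  | none => -1

-- _greedy: leftmost unbounded match of rest starting at left
def pvGreedy (x : List Char) : List Char → Int → Option (List Int)
  | [], _ => some []
  | c :: cs, left =>
    let i := pvFindU x c left
    if i < 0 then none
    else (pvGreedy x cs (i + 1)).map (fun ps => i :: ps)

-- [i for i, c in enumerate(x) if c == q0]
def pvAnchors (x : List Char) (q0 : Char) : List Int :=
  ((PySem.List.enumerate x).filter (fun ic => ic.2 == q0)).map (fun ic => ic.1)

-- _best: ascending scan over anchors paired with their successor (or len(x)),
-- keeping the last anchor whose greedy tail fits entirely below the successor
def pvBest (q : List Char) (x : List Char) : Option (List Int) :=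
  let anchors := pvAnchors x (q.headD ' ')
  (anchors.zip (anchors.drop 1 ++ [(x.length : Int)])).foldl
    (fun best av =>
      match pvGreedy x (q.drop 1) (av.1 + 1) with
      | some tail => if tail.all (fun p => decide (p < av.2)) then some (av.1 :: tail) else best
      | none => best) none

def pvProcessB (q : List Char) (xs : String) : List (String × List Int × Int × Int × Int) :=
  let x := xs.toList
  match pvBest q x with
  | none => []
  | some positions =>
    let cluster := if 1 < positions.length then
        PySem.List.pyGetD positions (-1) 0 - PySem.List.pyGetD positions (-2) 0 - 1
      else 0
    let sepscore := positions.foldl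
      (fun s p => s + (if pvSep.contains (PySem.List.pyGetD x (p - 1) ' ') then (1 : Int) else 0)) 0
    [(xs, positions, cluster, (x.length : Int) - PySem.List.pyGetD positions 0 0, sepscore)]

def fuzzyMatches_alt (query : String) (candidates : List String) (limit : Int) : List (String × List Int × Int × Int × Int) :=
  candidates.foldl (fun acc xs => acc ++ pvProcessB query.toList xs) []

-- ===== PRECONDITION & SPEC =====
-- Pre_ excludes only inputs where A raises: an empty query with a nonempty candidate
-- list makes A's functools.reduce run on an empty sequence (TypeError).
def Pre_fuzzyMatches (query : String) (candidates : List String) (limit : Int) : Prop :=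
  query ≠ "" ∨ candidates = []
instance (query : String) (candidates : List String) (limit : Int) : Decidable (Pre_fuzzyMatches query candidates limit) := by unfold Pre_fuzzyMatches; infer_instance

def pvWitness_fuzzyMatches : String × List String × Int := ("fz", ["foo/baz", "bar"], 10)

def Spec_fuzzyMatches (query : String) (candidates : List String) (limit : Int) (out : List (String × List Int × Int × Int × Int)) : Prop := out = fuzzyMatches_alt query candidates limit
instance (query : String) (candidates : List String) (limit : Int) (out : List (String × List Int × Int × Int × Int)) : Decidable (Spec_fuzzyMatches query candidates limit out) := by unfold Spec_fuzzyMatches; infer_instance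

-- ===== CLAIM (what is proved, stated in full; the proofs are below) =====
def Claim_equal_fuzzyMatches : Prop := ∀ (query : String) (candidates : List String) (limit : Int), Dom_fuzzyMatches query candidates limit → Pre_fuzzyMatches query candidates limit → Spec_fuzzyMatches query candidates limit (fuzzyMatches query candidates limit)

-- ===== LEMMAS AND PROOFS =====

-- proof-only intermediate machinery: an occurrence dictionary and a descending
-- anchor loop with bounded greedy matching, to which BOTH ports are reduced
def pvOcc (x : List Char) : PySem.Dict Char (List Int) :=
  (PySem.List.enumerate x).foldl (fun d ic => d.insert ic.2 (d.getD ic.2 [] ++ [ic.1])) PySem.Dict.empty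

def pvNextOcc (l : List Int) (left r : Int) : Int :=
  match l.find? (fun q => decide (left ≤ q) && decide (q < r)) with
  | some q => q
  | none => -1

def pvMatchRest (occ : PySem.Dict Char (List Int)) (r : Int) : List Char → Int → Option (List Int)
  | [], _ => some []
  | c :: cs, left =>
    let p := pvNextOcc (occ.getD c []) left r
    if p = -1 then none
    else (pvMatchRest occ r cs (p + 1)).map (fun ps => p :: ps)

def pvAnchorLoop (occ : PySem.Dict Char (List Int)) (rest : List Char) : List Int → Int → Option (List Int)
  | [], _ => none
  | a :: as_, r =>
    match pvMatchRest occ r rest (a + 1) with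
    | some tail => some (a :: tail)
    | none => pvAnchorLoop occ rest as_ a

theorem pv_find?_congr {α : Type} (l : List α) (p q : α → Bool)
    (h : ∀ a ∈ l, p a = q a) : l.find? p = l.find? q := by
  induction l with
  | nil => rfl
  | cons a t ih =>
    simp only [List.find?_cons]
    rw [h a (by simp)]
    split
    · rfl
    · exact ih (fun b hb => h b (by simp [hb]))

theorem pv_occ_foldl (c : Char) : ∀ (l : List (Int × Char)) (d : PySem.Dict Char (List Int)),
    ((l.foldl (fun d ic => d.insert ic.2 (d.getD ic.2 [] ++ [ic.1])) d).getD c [])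
      = d.getD c [] ++ (l.filter (fun ic => ic.2 == c)).map (fun ic => ic.1) := by
  intro l
  induction l with
  | nil => intro d; simp
  | cons ic t ih =>
    intro d
    simp only [List.foldl_cons, List.filter_cons]
    rw [ih]
    by_cases hc : ic.2 = c
    · subst hc
      rw [PySem.Dict.getD_insert_self]
      simp
    · have hbeq : (ic.2 == c) = false := by simp [hc]
      have : (d.insert ic.2 (d.getD ic.2 [] ++ [ic.1])).getD c [] = d.getD c [] := by
        simp [PySem.Dict.getD, PySem.Dict.get?_insert_of_ne _ _ (by simpa using Ne.symm hc)]
      rw [this, hbeq]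
      simp

theorem pv_occ_getD (x : List Char) (c : Char) :
    (pvOcc x).getD c [] = pvAnchors x c := by
  unfold pvOcc pvAnchors
  rw [pv_occ_foldl]
  simp [pysem]

theorem pv_mem_anchors (x : List Char) (c : Char) (a : Int) (h : a ∈ pvAnchors x c) :
    0 ≤ a ∧ a < (x.length : Int) := by
  unfold pvAnchors at h
  simp only [List.mem_map, List.mem_filter] at h
  obtain ⟨ic, ⟨hmem, _⟩, rfl⟩ := h
  rw [PySem.List.mem_enumerate_iff] at hmem
  obtain ⟨k, hk, rfl⟩ := hmem
  constructor <;> simp <;> omega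

theorem pv_pairwise_anchors (x : List Char) (c : Char) : (pvAnchors x c).Pairwise (· < ·) := by
  unfold pvAnchors
  exact List.Pairwise.map _ (fun _ _ h => h)
    ((PySem.List.pairwise_lt_enumerate x 0).filter _)

theorem pv_findCh_eq (x : List Char) (c : Char) (l r : Int) :
    pvFindCh x c l r = pvNextOcc (pvAnchors x c) l r := by
  have key : (pvAnchors x c).find? (fun q => decide (l ≤ q) && decide (q < r))
      = ((PySem.List.enumerate x).find?
          (fun ic => ic.2 == c && decide (l ≤ ic.1) && decide (ic.1 < r))).map (fun ic => ic.1) := by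
    unfold pvAnchors
    rw [List.find?_map, List.find?_filter]
    rw [pv_find?_congr _ _ (fun ic => (ic.2 == c) && decide (l ≤ ic.1) && decide (ic.1 < r))
      (by intro a _; by_cases h2 : (a.2 == c) = true <;> simp [h2])]
  unfold pvFindCh pvNextOcc
  rw [key]
  cases (PySem.List.enumerate x).find?
      (fun ic => ic.2 == c && decide (l ≤ ic.1) && decide (ic.1 < r)) <;> rfl

theorem pv_rfindCh_eq (x : List Char) (c : Char) (l r : Int) :
    pvRfindCh x c l r = pvNextOcc ((pvAnchors x c).reverse) l r := by
  have key : ((pvAnchors x c).reverse).find? (fun q => decide (l ≤ q) && decide (q < r))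
      = ((PySem.List.enumerate x).reverse.find?
          (fun ic => ic.2 == c && decide (l ≤ ic.1) && decide (ic.1 < r))).map (fun ic => ic.1) := by
    unfold pvAnchors
    rw [← List.map_reverse, ← List.filter_reverse]
    rw [List.find?_map, List.find?_filter]
    rw [pv_find?_congr _ _ (fun ic => (ic.2 == c) && decide (l ≤ ic.1) && decide (ic.1 < r))
      (by intro a _; by_cases h2 : (a.2 == c) = true <;> simp [h2])]
  unfold pvRfindCh pvNextOcc
  rw [key]
  cases (PySem.List.enumerate x).reverse.find?
      (fun ic => ic.2 == c && decide (l ≤ ic.1) && decide (ic.1 < r)) <;> rfl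

theorem pv_nextOcc_head (O : List Int) (r : Int) (h0 : ∀ a ∈ O, 0 ≤ a) :
    pvNextOcc O.reverse 0 r
      = (match (O.filter (fun a => decide (a < r))).reverse with
         | [] => (-1 : Int)
         | a :: _ => a) := by
  unfold pvNextOcc
  rw [pv_find?_congr _ _ (fun q => decide (q < r))
    (by intro a ha; have := h0 a (List.mem_reverse.mp ha); simp [this])]
  rw [← List.head?_filter, List.filter_reverse]
  cases (O.filter (fun a => decide (a < r))).reverse <;> rfl

-- the unbounded find on the ascending occurrence list
theorem pv_findU_eq (x : List Char) (c : Char) (left : Int) :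
    pvFindU x c left
      = (match (pvAnchors x c).find? (fun q => decide (left ≤ q)) with
         | some u => u
         | none => -1) := by
  have key : (pvAnchors x c).find? (fun q => decide (left ≤ q))
      = ((PySem.List.enumerate x).find?
          (fun ic => ic.2 == c && decide (left ≤ ic.1))).map (fun ic => ic.1) := by
    unfold pvAnchors
    rw [List.find?_map, List.find?_filter]
    rw [pv_find?_congr _ _ (fun ic => (ic.2 == c) && decide (left ≤ ic.1))
      (by intro a _; by_cases h2 : (a.2 == c) = true <;> simp [h2])]
  unfold pvFindU
  rw [key]
  cases (PySem.List.enumerate x).find? (fun ic => ic.2 == c && decide (left ≤ ic.1)) <;> rfl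

-- on a strictly ascending list, the bounded first hit is the unbounded one if below r
theorem pv_nextOcc_split (O : List Int) (left r : Int) (hs : O.Pairwise (· < ·)) :
    pvNextOcc O left r
      = (match O.find? (fun q => decide (left ≤ q)) with
         | some u => if u < r then u else -1
         | none => -1) := by
  induction O with
  | nil => rfl
  | cons a t ih =>
    unfold pvNextOcc
    simp only [List.find?_cons]
    by_cases hl : left ≤ a
    · by_cases hr : a < r
      · simp [hl, hr]
      · have hnone : t.find? (fun q => decide (left ≤ q) && decide (q < r)) = none := by
          rw [List.find?_eq_none]
          intro q hq
          have : a < q := (List.pairwise_cons.mp hs).1 q hq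
          simp; omega
        simp [hl, hr, hnone, pvNextOcc]
    · have ihr := ih (List.pairwise_cons.mp hs).2
      simp only [pvNextOcc] at ihr
      simp [hl, ihr]

-- bounded greedy (pvMatchRest) expressed through B's unbounded greedy plus the bound check
theorem pv_bounded_greedy (x : List Char) (r : Int) : ∀ (cs : List Char) (left : Int),
    pvMatchRest (pvOcc x) r cs left
      = (match pvGreedy x cs left with
         | some ps => if ps.all (fun p => decide (p < r)) then some ps else none
         | none => none) := by
  intro cs
  induction cs with
  | nil => intro left; simp [pvMatchRest, pvGreedy]
  | cons c cs' ih =>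
    intro left
    have hMR : pvMatchRest (pvOcc x) r (c :: cs') left
        = (if pvNextOcc ((pvOcc x).getD c []) left r = -1 then none
           else (pvMatchRest (pvOcc x) r cs' (pvNextOcc ((pvOcc x).getD c []) left r + 1)).map
             (fun ps => pvNextOcc ((pvOcc x).getD c []) left r :: ps)) := rfl
    have hG : pvGreedy x (c :: cs') left
        = (if pvFindU x c left < 0 then none
           else (pvGreedy x cs' (pvFindU x c left + 1)).map (fun ps => pvFindU x c left :: ps)) := rfl
    rw [hMR, hG, pv_occ_getD,
      pv_nextOcc_split (pvAnchors x c) left r (pv_pairwise_anchors x c), pv_findU_eq]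
    cases hfind : (pvAnchors x c).find? (fun q => decide (left ≤ q)) with
    | none => simp
    | some u =>
      have hu0 : 0 ≤ u := (pv_mem_anchors x c u (List.mem_of_find?_eq_some hfind)).1
      rw [show (match (some u : Option Int) with
            | some u => if u < r then u else -1
            | none => (-1 : Int)) = (if u < r then u else -1) from rfl,
          show (match (some u : Option Int) with
            | some u => u
            | none => (-1 : Int)) = u from rfl]
      by_cases hur : u < r
      · rw [if_pos hur, if_neg (by omega : ¬ u = (-1 : Int)), if_neg (by omega : ¬ u < (0 : Int))]
        rw [ih (u + 1)]
        cases hg : pvGreedy x cs' (u + 1) with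
        | none => rfl
        | some ts =>
          simp only [Option.map_some]
          have : ((u :: ts).all (fun p => decide (p < r)))
              = (ts.all (fun p => decide (p < r))) := by simp [hur]
          rw [this]
          by_cases hall : ts.all (fun p => decide (p < r)) = true
          · simp [hall]
          · simp only [Bool.not_eq_true] at hall
            simp [hall]
      · rw [if_neg hur, if_pos rfl, if_neg (by omega : ¬ u < (0 : Int))]
        cases hg : pvGreedy x cs' (u + 1) with
        | none => rfl
        | some ts =>
          simp only [Option.map_some]
          have : ((u :: ts).all (fun p => decide (p < r))) = false := by
            simp [hur]
          rw [this]
          rfl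

theorem pv_zip_snoc (ys : List Int) (a r : Int) :
    (ys ++ [a]).zip ((ys ++ [a]).drop 1 ++ [r])
      = (ys.zip (ys.drop 1 ++ [a])) ++ [(a, r)] := by
  cases ys with
  | nil => rfl
  | cons y ys' =>
    have hdrop : ((y :: ys') ++ [a]).drop 1 = ys' ++ [a] := rfl
    rw [hdrop]
    show (y :: ys' ++ [a]).zip ((ys' ++ [a]) ++ [r]) = _
    rw [List.zip_append (by simp)]
    rfl

-- A's descending anchor loop = B's ascending keep-last fold over anchor/successor pairs
theorem pv_loop_fold (x : List Char) (rest : List Char) :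
    ∀ (asc : List Int) (r : Int),
    pvAnchorLoop (pvOcc x) rest asc.reverse r
      = (asc.zip (asc.drop 1 ++ [r])).foldl
          (fun best av =>
            match pvGreedy x rest (av.1 + 1) with
            | some tail => if tail.all (fun p => decide (p < av.2)) then some (av.1 :: tail) else best
            | none => best) none := by
  intro asc
  induction asc using List.reverseRecOn with
  | nil => intro r; rfl
  | append_singleton ys a ih =>
    intro r
    rw [pv_zip_snoc, List.foldl_append]
    have hrev : (ys ++ [a]).reverse = a :: ys.reverse := by simp
    rw [hrev]
    have hAL : pvAnchorLoop (pvOcc x) rest (a :: ys.reverse) r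
        = (match pvMatchRest (pvOcc x) r rest (a + 1) with
           | some tail => some (a :: tail)
           | none => pvAnchorLoop (pvOcc x) rest ys.reverse a) := rfl
    rw [hAL, pv_bounded_greedy x r rest (a + 1), ih a]
    simp only [List.foldl_cons, List.foldl_nil]
    cases hg : pvGreedy x rest (a + 1) with
    | none => rfl
    | some ts =>
      by_cases hall : ts.all (fun p => decide (p < r)) = true
      · simp [hall]
      · simp only [Bool.not_eq_true] at hall
        simp [hall]

theorem pv_best_eq (q0 : Char) (rest : List Char) (x : List Char) :
    pvBest (q0 :: rest) x
      = pvAnchorLoop (pvOcc x) rest (pvAnchors x q0).reverse (x.length : Int) := by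
  unfold pvBest
  simp only [List.headD_cons, List.drop_succ_cons, List.drop_zero]
  rw [pv_loop_fold x rest (pvAnchors x q0) (x.length : Int)]

-- definitional unfoldings for the A-side loops (all rfl)
theorem pvGo_cons_true (x : List Char) (r : Int) (c : Char) (cs : List Char) (left : Int) (acc : List Int) :
    pvIsMatchGo x r (c :: cs) true left acc
      = (if pvRfindCh x c left r = -1 then (false, acc)
         else pvIsMatchGo x r cs false (pvRfindCh x c left r + 1) (acc ++ [pvRfindCh x c left r])) := rfl

theorem pvGo_cons_false (x : List Char) (r : Int) (c : Char) (cs : List Char) (left : Int) (acc : List Int) :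
    pvIsMatchGo x r (c :: cs) false left acc
      = (if pvFindCh x c left r = -1 then (false, acc)
         else pvIsMatchGo x r cs false (pvFindCh x c left r + 1) (acc ++ [pvFindCh x c left r])) := rfl

theorem pvMR_cons (occ : PySem.Dict Char (List Int)) (r : Int) (c : Char) (cs : List Char) (left : Int) :
    pvMatchRest occ r (c :: cs) left
      = (if pvNextOcc (occ.getD c []) left r = -1 then none
         else (pvMatchRest occ r cs (pvNextOcc (occ.getD c []) left r + 1)).map (fun ps => pvNextOcc (occ.getD c []) left r :: ps)) := rfl

theorem pvWhile_succ (q x : List Char) (f : Nat) (l r : Int) :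
    pvWhile q x (f + 1) l r
      = (if (pvIsMatch q x l r).2 = [] then pvIsMatch q x l r
         else if (pvIsMatch q x l r).1 then pvIsMatch q x l r
         else pvWhile q x f l ((pvIsMatch q x l r).2.headD 0)) := rfl

theorem pv_rest_equiv (x : List Char) (r : Int) : ∀ (cs : List Char) (left : Int) (acc : List Int),
    ((pvMatchRest (pvOcc x) r cs left).isSome = (pvIsMatchGo x r cs false left acc).1)
    ∧ (∀ ps, pvMatchRest (pvOcc x) r cs left = some ps →
        (pvIsMatchGo x r cs false left acc).2 = acc ++ ps)
    ∧ (∃ t, (pvIsMatchGo x r cs false left acc).2 = acc ++ t) := by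
  intro cs
  induction cs with
  | nil =>
    intro left acc
    refine ⟨rfl, fun ps hps => ?_, ⟨[], by simp [pvIsMatchGo]⟩⟩
    have : ps = [] := by
      have h' : (some [] : Option (List Int)) = some ps := hps
      exact (Option.some.injEq _ _ ▸ h' : ([] : List Int) = ps).symm
    subst this
    simp [pvIsMatchGo]
  | cons c cs ih =>
    intro left acc
    have hp : pvNextOcc ((pvOcc x).getD c []) left r = pvFindCh x c left r := by
      rw [pv_occ_getD, pv_findCh_eq]
    rw [pvGo_cons_false, pvMR_cons, hp]
    by_cases hpos : pvFindCh x c left r = -1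
    · rw [if_pos hpos, if_pos hpos]
      refine ⟨rfl, ?_, ⟨[], by simp⟩⟩
      intro ps hps
      simp at hps
    · rw [if_neg hpos, if_neg hpos]
      obtain ⟨ih1, ih2, ih3⟩ := ih (pvFindCh x c left r + 1) (acc ++ [pvFindCh x c left r])
      refine ⟨?_, ?_, ?_⟩
      · rw [← ih1]
        cases pvMatchRest (pvOcc x) r cs (pvFindCh x c left r + 1) <;> rfl
      · intro ps hps
        cases hm : pvMatchRest (pvOcc x) r cs (pvFindCh x c left r + 1) with
        | none => rw [hm] at hps; cases hps
        | some qs =>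
          rw [hm] at hps
          simp only [Option.map_some, Option.some.injEq] at hps
          subst hps
          rw [ih2 qs hm]
          simp
      · obtain ⟨t, ht⟩ := ih3
        exact ⟨pvFindCh x c left r :: t, by rw [ht]; simp⟩

theorem pv_anchor_equiv (q0 : Char) (rest : List Char) (x : List Char) :
    ∀ (rev : List Int) (fuel : Nat) (r : Int),
    rev = ((pvAnchors x q0).filter (fun a => decide (a < r))).reverse →
    rev.length < fuel →
    pvWhile (q0 :: rest) x fuel 0 r
      = (match pvAnchorLoop (pvOcc x) rest rev r with
         | some ps => (true, ps)
         | none => (false, ([] : List Int))) := by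
  intro rev
  induction rev with
  | nil =>
    intro fuel r hrev hfuel
    cases fuel with
    | zero => omega
    | succ f =>
      have hpos : pvRfindCh x q0 0 r = -1 := by
        rw [pv_rfindCh_eq, pv_nextOcc_head _ _ (fun a ha => (pv_mem_anchors x q0 a ha).1), ← hrev]
      have hIsM : pvIsMatch (q0 :: rest) x 0 r = (false, ([] : List Int)) := by
        show pvIsMatchGo x r (q0 :: rest) true 0 [] = _
        rw [pvGo_cons_true, hpos, if_pos rfl]
      rw [pvWhile_succ, hIsM]
      simp [pvAnchorLoop]
  | cons a rev' ih =>
    intro fuel r hrev hfuel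
    cases fuel with
    | zero => omega
    | succ f =>
      have hmem : a ∈ (pvAnchors x q0).filter (fun a => decide (a < r)) := by
        have : a ∈ ((pvAnchors x q0).filter (fun a => decide (a < r))).reverse := by
          rw [← hrev]; simp
        simpa using this
      have haO : a ∈ pvAnchors x q0 := (List.mem_filter.mp hmem).1
      have har : a < r := by simpa using (List.mem_filter.mp hmem).2
      have ha0 : 0 ≤ a := (pv_mem_anchors x q0 a haO).1
      have hpos : pvRfindCh x q0 0 r = a := by
        rw [pv_rfindCh_eq, pv_nextOcc_head _ _ (fun b hb => (pv_mem_anchors x q0 b hb).1), ← hrev]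
      obtain ⟨h1, h2, h3⟩ := pv_rest_equiv x r rest (a + 1) [a]
      have hIsM : pvIsMatch (q0 :: rest) x 0 r = pvIsMatchGo x r rest false (a + 1) [a] := by
        show pvIsMatchGo x r (q0 :: rest) true 0 [] = _
        rw [pvGo_cons_true, hpos, if_neg (by omega : ¬ a = (-1 : Int))]
        rfl
      rw [pvWhile_succ, hIsM]
      show _ = (match pvAnchorLoop (pvOcc x) rest (a :: rev') r with
         | some ps => (true, ps)
         | none => (false, ([] : List Int)))
      have hAL : pvAnchorLoop (pvOcc x) rest (a :: rev') r
          = (match pvMatchRest (pvOcc x) r rest (a + 1) with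
             | some tail => some (a :: tail)
             | none => pvAnchorLoop (pvOcc x) rest rev' a) := rfl
      rw [hAL]
      cases hm : pvMatchRest (pvOcc x) r rest (a + 1) with
      | some ps =>
        have hfst : (pvIsMatchGo x r rest false (a + 1) [a]).1 = true := by
          rw [← h1, hm]; rfl
        have hsnd : (pvIsMatchGo x r rest false (a + 1) [a]).2 = a :: ps := by
          rw [h2 ps hm]; rfl
        rw [if_neg (by rw [hsnd]; simp), if_pos hfst]
        exact Prod.ext hfst hsnd
      | none =>
        have hfst : (pvIsMatchGo x r rest false (a + 1) [a]).1 = false := by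
          rw [← h1, hm]; rfl
        obtain ⟨t, ht⟩ := h3
        have hne : ¬ (pvIsMatchGo x r rest false (a + 1) [a]).2 = [] := by
          rw [ht]; simp
        have hhead : (pvIsMatchGo x r rest false (a + 1) [a]).2.headD 0 = a := by
          rw [ht]; rfl
        rw [if_neg hne, if_neg (by rw [hfst]; simp), hhead]
        have hfil : (pvAnchors x q0).filter (fun b => decide (b < r)) = rev'.reverse ++ [a] := by
          have := congrArg List.reverse hrev
          simpa using this.symm
        have hpw : (rev'.reverse ++ [a]).Pairwise (· < ·) := by
          rw [← hfil]; exact (pv_pairwise_anchors x q0).filter _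
        have hlt : ∀ b ∈ rev'.reverse, b < a := by
          intro b hb
          exact (List.pairwise_append.mp hpw).2.2 b hb a (by simp)
        have hrev' : rev' = ((pvAnchors x q0).filter (fun b => decide (b < a))).reverse := by
          have h1' : (pvAnchors x q0).filter (fun b => decide (b < a))
              = ((pvAnchors x q0).filter (fun b => decide (b < r))).filter (fun b => decide (b < a)) := by
            rw [List.filter_filter]
            apply List.filter_congr
            intro b _
            by_cases hb : b < a
            · have hbr : b < r := by omega
              simp [hb, hbr]
            · simp [hb]
          rw [h1', hfil, List.filter_append]
          have h2' : (rev'.reverse).filter (fun b => decide (b < a)) = rev'.reverse :=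
            List.filter_eq_self.mpr (fun b hb => by simpa using hlt b hb)
          have h3' : ([a] : List Int).filter (fun b => decide (b < a)) = [] := by simp
          rw [h2', h3']
          simp
        rw [ih f a hrev' (by simpa using Nat.lt_of_succ_lt_succ hfuel)]

theorem pv_anchorLoop_ne_nil (occ : PySem.Dict Char (List Int)) (rest : List Char) :
    ∀ (l : List Int) (r : Int) (ps : List Int),
    pvAnchorLoop occ rest l r = some ps → ps ≠ [] := by
  intro l
  induction l with
  | nil => intro r ps h; cases h
  | cons a t ih =>
    intro r ps h
    simp only [pvAnchorLoop] at h
    cases hm : pvMatchRest occ r rest (a + 1) with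
    | some tail => rw [hm] at h; cases h; simp
    | none => rw [hm] at h; exact ih a ps h

theorem pv_cluster_eq (ps : List Int) :
    (PySem.List.enumerate ps).foldl
      (fun acc ip => if ip.1 > 0 then
          PySem.List.pyGetD ps ip.1 0 - PySem.List.pyGetD ps (ip.1 - 1) 0 - 1
        else acc) 0
    = (if 1 < ps.length then
        PySem.List.pyGetD ps (-1) 0 - PySem.List.pyGetD ps (-2) 0 - 1
      else 0) := by
  induction ps using List.reverseRecOn with
  | nil => simp [PySem.List.enumerate]
  | append_singleton qs p _ =>
    rw [PySem.List.enumerate_append, List.foldl_append]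
    by_cases hqs : qs = []
    · subst hqs
      simp [PySem.List.enumerate]
    · have hlen : 0 < qs.length := List.length_pos_iff.mpr hqs
      have hstep : PySem.List.enumerate [p] ((0 : Int) + qs.length) = [((qs.length : Int), p)] := by
        simp [PySem.List.enumerate]
      rw [hstep]
      simp only [List.foldl_cons, List.foldl_nil]
      rw [if_pos (by exact_mod_cast hlen)]
      rw [if_pos (by simp; omega)]
      congr 1
      · congr 1
        · rw [PySem.List.pyGetD_natCast, PySem.List.pyGetD_neg_one (qs ++ [p]) 0 (by simp)]
          rw [List.getLast_concat]
          simp [List.getD]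
        · have hcast : ((qs.length : Int) - 1) = ((qs.length - 1 : Nat) : Int) := by
            omega
          rw [hcast, PySem.List.pyGetD_natCast,
            PySem.List.pyGetD_neg_ofNat (qs ++ [p]) 2 0 (by omega) (by simp; omega)]
          have hidx2 : (qs ++ [p]).length - 2 = qs.length - 1 := by simp
          have hlt : qs.length - 1 < (qs ++ [p]).length := by simp
          simp only [hidx2]
          rw [List.getD_eq_getElem?_getD, List.getElem?_eq_getElem hlt]
          rfl

theorem pv_sep_eq (x : List Char) (a : Int) (t : List Int) :
    (match (a :: t).map (fun p => if pvSep.contains (PySem.List.pyGetD x (p - 1) ' ') then (1 : Int) else 0) with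
     | [] => (0 : Int)
     | m :: rest => rest.foldl (· + ·) m)
    = (a :: t).foldl
        (fun s p => s + (if pvSep.contains (PySem.List.pyGetD x (p - 1) ' ') then (1 : Int) else 0)) 0 := by
  show (t.map (fun p => if pvSep.contains (PySem.List.pyGetD x (p - 1) ' ') then (1 : Int) else 0)).foldl (· + ·)
      (if pvSep.contains (PySem.List.pyGetD x (a - 1) ' ') then (1 : Int) else 0) = _
  rw [List.foldl_map]
  simp only [List.foldl_cons, zero_add]

theorem pv_processA_eq (q0 : Char) (rest : List Char) (xs : String) :
    pvProcessA (q0 :: rest) xs = pvProcessB (q0 :: rest) xs := by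
  simp only [pvProcessA, pvProcessB]
  rw [pv_best_eq]
  have hrev : (pvAnchors xs.toList q0).reverse
      = ((pvAnchors xs.toList q0).filter (fun a => decide (a < (xs.toList.length : Int)))).reverse := by
    congr 1
    exact (List.filter_eq_self.mpr (fun a ha => by simpa using (pv_mem_anchors _ _ a ha).2)).symm
  have hfuel : ((pvAnchors xs.toList q0).reverse).length < xs.toList.length + 1 := by
    have h1 : (pvAnchors xs.toList q0).length ≤ (PySem.List.enumerate xs.toList).length := by
      unfold pvAnchors
      rw [List.length_map]
      exact List.length_filter_le _ _
    rw [PySem.List.length_enumerate] at h1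
    rw [List.length_reverse]
    omega
  rw [pv_anchor_equiv q0 rest xs.toList ((pvAnchors xs.toList q0).reverse)
      (xs.toList.length + 1) (xs.toList.length : Int) hrev hfuel]
  cases hal : pvAnchorLoop (pvOcc xs.toList) rest ((pvAnchors xs.toList q0).reverse) (xs.toList.length : Int) with
  | none => rfl
  | some positions =>
    have hne : positions ≠ [] := pv_anchorLoop_ne_nil _ _ _ _ _ hal
    obtain ⟨a, t, rfl⟩ : ∃ a t, positions = a :: t := by
      cases positions with
      | nil => exact absurd rfl hne
      | cons a t => exact ⟨a, t, rfl⟩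
    rw [pv_cluster_eq, pv_sep_eq]
    simp

theorem pv_outer (q : List Char) (limit : Int)
    (hq : ∀ xs : String, pvProcessA q xs = pvProcessB q xs) :
    ∀ (cs : List String) (count : Int) (acc : List (String × List Int × Int × Int × Int)),
    (cs.foldl (fun st xs =>
        if st.1 then st
        else
          let out := pvProcessA q xs
          if out = [] then st
          else (false && ((st.2.1 + 1) == limit), st.2.1 + 1, st.2.2 ++ out))
      (false, count, acc)).2.2
    = cs.foldl (fun acc xs => acc ++ pvProcessB q xs) acc := by
  intro cs
  induction cs with
  | nil => intro count acc; rfl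
  | cons xh ct ih =>
    intro count acc
    simp only [List.foldl_cons]
    by_cases h : pvProcessA q xh = []
    · have hstep : (if (false, count, acc).1 = true then (false, count, acc)
          else
            let out := pvProcessA q xh
            if out = [] then (false, count, acc)
            else (false && (((false, count, acc).2.1 + 1) == limit), (false, count, acc).2.1 + 1,
              (false, count, acc).2.2 ++ out)) = (false, count, acc) := by
        simp [h]
      rw [hstep, ih]
      have : pvProcessB q xh = [] := by rw [← hq, h]
      rw [this, List.append_nil]
    · have hstep : (if (false, count, acc).1 = true then (false, count, acc)
          else
            let out := pvProcessA q xh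
            if out = [] then (false, count, acc)
            else (false && (((false, count, acc).2.1 + 1) == limit), (false, count, acc).2.1 + 1,
              (false, count, acc).2.2 ++ out)) = (false, count + 1, acc ++ pvProcessA q xh) := by
        simp [h]
      rw [hstep, ih, hq]

-- ===== VERDICT (by name: the statement is the Claim_ definition above) =====
theorem fuzzyMatches_spec : Claim_equal_fuzzyMatches := by
  unfold Claim_equal_fuzzyMatches
  intro query candidates limit _hdom hpre
  unfold Spec_fuzzyMatches
  rcases hpre with hq | hc
  · have hql : query.toList ≠ [] := fun h => hq (String.toList_eq_nil_iff.mp h)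
    obtain ⟨q0, rest, hqe⟩ : ∃ q0 rest, query.toList = q0 :: rest := by
      cases hh : query.toList with
      | nil => exact absurd hh hql
      | cons q0 rest => exact ⟨q0, rest, rfl⟩
    simp only [fuzzyMatches, fuzzyMatches_alt, hqe]
    exact pv_outer (q0 :: rest) limit (fun xs => pv_processA_eq q0 rest xs) candidates 0 []
  · subst hc
    rfl
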